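-- pv_equiv track=rewrite | github.com/cheluis/topcoder-py | srm2.py | do_sort
-- ===== SOURCE A (Python) =====
-- def do_sort(s_input):
-- 	output = ''
-- 	q = len(s_input)
-- 	for i in range(0, q):
-- 		if s_input[i] not in output:
-- 			aux = s_input[i]
-- 			output = output + aux
-- 			for j in range(i+1, q):
-- 				if s_input[j] == aux:
-- 					 output = output + aux
--
-- 	return output
-- ===== SOURCE B (Python) =====
-- def do_sort(s_input):
--     counts = {}
--     for c in s_input:
--         counts[c] = counts.get(c, 0) + 1
--     return ''.join(c * n for c, n in counts.items())
-- ===== Notes on version B (the rewrite author's own statement) =====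
-- stated objective: faster
-- what changed: Replaces the quadratic outer/inner index scans and the growing-string membership test with a single counting pass over the string (one dict of occurrence counts in first-appearance order) followed by one join.
import Mathlib
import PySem

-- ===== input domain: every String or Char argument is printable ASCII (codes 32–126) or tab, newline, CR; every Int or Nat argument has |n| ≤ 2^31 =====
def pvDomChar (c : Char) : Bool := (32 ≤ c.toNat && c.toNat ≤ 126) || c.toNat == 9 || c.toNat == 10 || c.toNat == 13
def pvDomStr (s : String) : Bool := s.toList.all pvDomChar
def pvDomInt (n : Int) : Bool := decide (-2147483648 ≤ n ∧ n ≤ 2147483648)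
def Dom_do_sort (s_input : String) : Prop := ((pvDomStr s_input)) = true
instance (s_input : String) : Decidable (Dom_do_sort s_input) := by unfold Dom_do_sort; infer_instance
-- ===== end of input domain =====

-- B replaces A's quadratic nested index scans with one counting pass (a dict of
-- occurrence counts in first-appearance order) followed by a single join: O(n) vs O(n^2).

-- ===== PORT A =====
-- literal port of A: outer loop over indices, substring membership test on the
-- accumulated output, inner loop appending the later occurrences of s_input[i]
def do_sort (s_input : String) : String :=
  let cs := s_input.toList
  let q : Int := PySem.Str.len s_input
  let output := (PySem.List.pyRange 0 q 1).foldl (fun output i =>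
    if PySem.Chars.isIn [PySem.List.pyGetD cs i 'x'] output then output
    else
      let aux := PySem.List.pyGetD cs i 'x'
      let output := output ++ [aux]
      (PySem.List.pyRange (i+1) q 1).foldl (fun out j =>
        if PySem.List.pyGetD cs j 'x' = aux then out ++ [aux] else out) output) []
  String.ofList output

-- ===== PORT B =====
-- literal port of Source B: one counting pass into a dict, then join c * n over its items
def do_sort_alt (s_input : String) : String :=
  let counts : PySem.Dict Char Int :=
    s_input.toList.foldl (fun d c => d.insert c (d.getD c 0 + 1)) PySem.Dict.empty
  String.ofList (counts.items.flatMap (fun p => PySem.List.pyRepeat [p.1] p.2))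

-- ===== PRECONDITION & SPEC =====
def Spec_do_sort (s_input : String) (out : String) : Prop := out = do_sort_alt s_input
instance (s_input : String) (out : String) : Decidable (Spec_do_sort s_input out) := by unfold Spec_do_sort; infer_instance

-- ===== CLAIM (what is proved, stated in full; the proofs are below) =====
def Claim_equal_do_sort : Prop := ∀ (s_input : String), Dom_do_sort s_input → Spec_do_sort s_input (do_sort s_input)

-- ===== LEMMAS AND PROOFS =====

-- A's inner loop appends one copy of c per occurrence of c in the scanned suffix
lemma foldl_append_eq_replicate (c : Char) (l : List Char) (out : List Char) :
    l.foldl (fun o x => if x = c then o ++ [c] else o) out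
      = out ++ List.replicate (l.count c) c := by
  induction l generalizing out with
  | nil => simp
  | cons x xs ih =>
    by_cases h : x = c
    · simp [h, ih, List.append_assoc]
      rw [← List.replicate_succ, List.replicate_succ']
    · simp [h, ih]

-- membership in the partially built output = membership in the processed prefix
lemma mem_pvGrouped_take (l : List Char) (n : Nat) (c : Char) :
    c ∈ (PySem.List.dedup (l.take n)).flatMap
          (fun k => List.replicate (l.count k) k) ↔ c ∈ l.take n := by
  constructor
  · rintro h
    simp only [List.mem_flatMap] at h
    obtain ⟨k, hk, hc⟩ := h
    rw [List.eq_of_mem_replicate hc]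
    exact (PySem.List.mem_dedup _ _).1 hk
  · intro h
    refine List.mem_flatMap.2 ⟨c, (PySem.List.mem_dedup _ _).2 h, ?_⟩
    have h1 : 0 < (l.take n).count c := List.count_pos_iff.2 h
    have h2 : (l.take n).count c ≤ l.count c := by
      conv_rhs => rw [← List.take_append_drop n l]
      rw [List.count_append]; omega
    exact List.mem_replicate.2 ⟨by omega, rfl⟩

-- A's outer loop over the first n indices produces the grouped output of the first n chars
lemma outer_loop_eq (l : List Char) (n : Nat) (hn : n ≤ l.length) :
    (PySem.List.pyRange 0 (n : Int) 1).foldl (fun output i =>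
      if PySem.Chars.isIn [PySem.List.pyGetD l i 'x'] output then output
      else
        let aux := PySem.List.pyGetD l i 'x'
        let output := output ++ [aux]
        (PySem.List.pyRange (i+1) (l.length : Int) 1).foldl (fun out j =>
          if PySem.List.pyGetD l j 'x' = aux then out ++ [aux] else out) output) []
    = (PySem.List.dedup (l.take n)).flatMap (fun k => List.replicate (l.count k) k) := by
  induction n with
  | zero => simp [PySem.List.pyRange_one_eq_nil]
  | succ n ih =>
    have hn' : n ≤ l.length := Nat.le_of_succ_le hn
    have hlt : n < l.length := hn
    have hcast : ((n : Int) + 1) = ((n + 1 : Nat) : Int) := by push_cast; ring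
    rw [← hcast, PySem.List.pyRange_one_succ_right (by positivity), List.foldl_append,
      ih hn']
    simp only [List.foldl_cons, List.foldl_nil]
    have hget : PySem.List.pyGetD l (n : Int) 'x' = l[n] := by
      simp [PySem.List.pyGetD_natCast, List.getD_eq_getElem?_getD, List.getElem?_eq_getElem hlt]
    rw [hget]
    have hmem : PySem.Chars.isIn [l[n]] ((PySem.List.dedup (l.take n)).flatMap
        (fun k => List.replicate (l.count k) k)) = true ↔ l[n] ∈ l.take n := by
      rw [PySem.Chars.isIn_iff_infix, List.infix_iff_prefix_suffix]
      constructor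
      · rintro ⟨t, ht, hsuf⟩
        have : l[n] ∈ t := ht.mem (by simp)
        exact (mem_pvGrouped_take l n _).1 (hsuf.mem this)
      · intro h
        have := (mem_pvGrouped_take l n _).2 h
        obtain ⟨s, t, hst⟩ := List.append_of_mem this
        exact ⟨l[n] :: t, by simp, by rw [hst]; exact ⟨s, by simp⟩⟩
    have htake : l.take (n + 1) = l.take n ++ [l[n]] := List.take_succ_eq_append_getElem hlt
    by_cases hc : l[n] ∈ l.take n
    · rw [if_pos (hmem.2 hc)]
      have : PySem.List.dedup (l.take (n+1)) = PySem.List.dedup (l.take n) := by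
        simp only [PySem.List.dedup_eq_ofList, htake, PySem.Set.ofList_append_singleton]
        have hct : PySem.Set.contains (PySem.Set.ofList (l.take n)) l[n] = true :=
          (PySem.Set.contains_iff _ _).2 ((PySem.Set.mem_ofList _ _).2 hc)
        simp only [PySem.Set.add, hct, if_true]
      rw [this]
    · rw [if_neg (fun h => hc (hmem.1 h))]
      rw [PySem.List.foldl_pyRange_pyGetD' l 'x' (fun out x => if x = l[n] then out ++ [l[n]] else out) _ (by omega)]
      have hdropcast : ((n : Int) + 1).toNat = n + 1 := by omega
      rw [hdropcast, foldl_append_eq_replicate]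
      have hdrop : l.drop n = l[n] :: l.drop (n+1) := (List.getElem_cons_drop hlt).symm
      have hcount : l.count l[n] = (l.drop (n+1)).count l[n] + 1 := by
        have h0 : (l.take n).count l[n] = 0 := List.count_eq_zero.2 hc
        calc l.count l[n] = ((l.take n) ++ l.drop n).count l[n] := by
              rw [List.take_append_drop]
          _ = (l.drop (n+1)).count l[n] + 1 := by
              rw [List.count_append, hdrop, List.count_cons]; simp [h0]
      have hded : PySem.List.dedup (l.take (n+1))
          = PySem.List.dedup (l.take n) ++ [l[n]] := by
        simp only [PySem.List.dedup_eq_ofList, htake, PySem.Set.ofList_append_singleton]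
        have hcf : PySem.Set.contains (PySem.Set.ofList (l.take n)) l[n] = false := by
          rw [Bool.eq_false_iff]
          intro h
          exact hc ((PySem.Set.mem_ofList _ _).1 ((PySem.Set.contains_iff _ _).1 h))
        simp only [PySem.Set.add, hcf, Bool.false_eq_true, if_false]
      rw [hded, List.flatMap_append]
      simp [hcount, List.replicate_succ, List.append_assoc]

-- B computes the same grouped list
lemma alt_eq_grouped (l : List Char) :
    ((l.foldl (fun d c => d.insert c (d.getD c 0 + 1)) PySem.Dict.empty :
        PySem.Dict Char Int).items.flatMap (fun p => PySem.List.pyRepeat [p.1] p.2))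
      = (PySem.List.dedup l).flatMap (fun k => List.replicate (l.count k) k) := by
  rw [PySem.Dict.foldl_insert_getD_add_one_eq_counter, PySem.Dict.items_counter,
    List.flatMap_map]
  refine List.flatMap_congr (fun k _ => ?_)
  rw [PySem.List.pyRepeat_singleton]
  simp

-- ===== VERDICT (by name: the statement is the Claim_ definition above) =====
theorem do_sort_spec : Claim_equal_do_sort := by
  intro s _
  unfold Spec_do_sort do_sort do_sort_alt
  dsimp only
  rw [alt_eq_grouped, PySem.Str.len_eq,
    outer_loop_eq s.toList s.toList.length le_rfl, List.take_length]
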